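-- pv_equiv track=rewrite | github.com/monaya37/DM-project | Fp-growth.py | get_conditional_pattern_base
-- ===== SOURCE A (Python) =====
-- from collections import defaultdict
--
-- def get_conditional_pattern_base(frequent_itemsets,sorted_sransactions):
--     x = dict(sorted(frequent_itemsets.items(), key=lambda x:x[1]))
--     sorted_frequent_itemsets = x.keys() #menna handled this already?
--     pattern_base = defaultdict(int)
--     temp = defaultdict(int) #used to copy
--     coditional_pattern_base = dict()
--
--     for item in sorted_frequent_itemsets:
--         for i in range(len(sorted_sransactions)):
--             if (sorted_sransactions[i].get(item) is not None):
--                 transaction = sorted_sransactions[i].keys()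
--                 index = list(transaction).index(item)
--                 path1 = list(transaction)[:index]
--                 path = ''
--                 if(len(path1) > 0):
--                     for i in range(len(path1)):
--                         path+=path1[i] + ','
--                     path = list(path)
--                     path.pop()
--                     path = ''.join(path)
--                 pattern_base[path] += 1
--
--         temp = pattern_base.copy()
--         coditional_pattern_base[item] = temp
--         pattern_base.clear()
--
--     return coditional_pattern_base;
-- ===== SOURCE B (Python) =====
-- def get_conditional_pattern_base(frequent_itemsets, sorted_sransactions):
--     # Single pass over transactions: walk each transaction once, extending the
--     # comma-joined prefix path incrementally, and credit the path to EVERY key's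
--     # pattern base as we go; then read the bases off in frequency-sorted order.
--     bases = {}
--     for t in sorted_sransactions:
--         path = ''
--         first = True
--         for k in t:
--             d = bases.setdefault(k, {})
--             d[path] = d.get(path, 0) + 1
--             path = k if first else path + ',' + k
--             first = False
--     order = [k for k, _ in sorted(frequent_itemsets.items(), key=lambda kv: kv[1])]
--     return {item: dict(bases.get(item, {})) for item in order}
-- ===== Notes on version B (the rewrite author's own statement) =====
-- stated objective: faster
-- what changed: A rescans the whole transaction list once per frequent item (and rebuilds each prefix path with list.index and slicing); B makes a single pass over the transactions, extending the comma-joined prefix path incrementally and crediting it to every key's pattern base as it walks, then reads the bases off in frequency-sorted order.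
import Mathlib
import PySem

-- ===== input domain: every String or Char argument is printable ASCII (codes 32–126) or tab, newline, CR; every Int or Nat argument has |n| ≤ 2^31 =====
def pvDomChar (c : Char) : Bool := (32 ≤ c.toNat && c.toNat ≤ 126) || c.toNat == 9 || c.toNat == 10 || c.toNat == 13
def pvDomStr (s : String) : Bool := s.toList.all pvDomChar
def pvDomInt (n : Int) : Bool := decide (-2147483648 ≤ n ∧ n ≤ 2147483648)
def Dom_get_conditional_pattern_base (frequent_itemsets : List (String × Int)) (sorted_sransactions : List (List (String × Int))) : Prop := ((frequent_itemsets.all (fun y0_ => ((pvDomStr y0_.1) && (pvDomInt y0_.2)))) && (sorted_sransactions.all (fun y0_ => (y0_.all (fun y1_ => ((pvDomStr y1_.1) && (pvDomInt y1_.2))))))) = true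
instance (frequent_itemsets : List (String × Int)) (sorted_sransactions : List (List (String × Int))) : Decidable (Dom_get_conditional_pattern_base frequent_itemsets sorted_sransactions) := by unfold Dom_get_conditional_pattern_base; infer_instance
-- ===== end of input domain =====

-- B replaces A's item-outer / transaction-inner double scan by a SINGLE pass over the
-- transactions that extends each prefix path incrementally and credits it to every key's
-- pattern base as it goes (objective: faster, one transaction scan instead of one per item).

-- ===== PORT A =====

-- A's path-building loop: 'path += path1[i] + ","' over all of path1, then pop the last char
-- (only when path1 is nonempty; otherwise path stays '').  Built on List Char (kernel-transparent).
def pvPathA (path1 : List String) : String :=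
  if 0 < path1.length then
    String.mk ((path1.foldl (fun acc s => acc ++ s.toList ++ [',']) []).dropLast)
  else ""

-- body of A's inner 'for i in range(len(sorted_sransactions))' loop, for a fixed item
def pvStepA (item : String) (pattern_base : PySem.Dict String Int) (t : List (String × Int)) :
    PySem.Dict String Int :=
  let td := PySem.Dict.ofList t                  -- the Python argument is a dict
  if (td.get? item).isSome then
    let transaction := td.keys
    -- list(transaction).index(item): item is present here, so index? is some (the getD 0 is unreachable)
    let index : Nat := (PySem.List.index? transaction item).getD 0
    let path1 := PySem.List.slice transaction none (some (index : Int))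
    let path := pvPathA path1
    PySem.Dict.modify pattern_base path 0 (· + 1)  -- defaultdict(int): pattern_base[path] += 1
  else pattern_base

def get_conditional_pattern_base (frequent_itemsets : List (String × Int)) (sorted_sransactions : List (List (String × Int))) : List (String × List (String × Int)) :=
  let fi := PySem.Dict.ofList frequent_itemsets  -- the Python argument is a dict
  let x := PySem.Dict.ofList (PySem.List.sorted fi.items (fun p => p.2))
  let sorted_frequent_itemsets := x.keys
  (sorted_frequent_itemsets.foldl
    (fun (acc : PySem.Dict String (PySem.Dict String Int)) item =>
      let pattern_base := sorted_sransactions.foldl (pvStepA item) PySem.Dict.empty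
      acc.insert item pattern_base)              -- temp = pattern_base.copy(); cpb[item] = temp
    PySem.Dict.empty).items.map (fun p => (p.1, p.2.items))

-- ===== PORT B =====

-- body of B's 'for k in t' loop: state = (bases, path, first)
def pvStepBInner (st : PySem.Dict String (PySem.Dict String Int) × List Char × Bool)
    (k : String) : PySem.Dict String (PySem.Dict String Int) × List Char × Bool :=
  let b := st.1.setdefault k PySem.Dict.empty    -- d = bases.setdefault(k, {})
  let d := b.getD k PySem.Dict.empty
  let p := String.mk st.2.1
  (b.insert k (d.insert p (d.getD p 0 + 1)),     -- d[path] = d.get(path, 0) + 1  (d aliases bases[k])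
   (if st.2.2 then k.toList else st.2.1 ++ ',' :: k.toList),  -- path = k if first else path + ',' + k
   false)

-- body of B's 'for t in sorted_sransactions' loop
def pvStepB (bases : PySem.Dict String (PySem.Dict String Int)) (t : List (String × Int)) :
    PySem.Dict String (PySem.Dict String Int) :=
  (((PySem.Dict.ofList t).keys).foldl pvStepBInner (bases, [], true)).1

def get_conditional_pattern_base_alt (frequent_itemsets : List (String × Int)) (sorted_sransactions : List (List (String × Int))) : List (String × List (String × Int)) :=
  let fi := PySem.Dict.ofList frequent_itemsets
  let bases := sorted_sransactions.foldl pvStepB PySem.Dict.empty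
  let order := (PySem.List.sorted fi.items (fun kv => kv.2)).map (fun kv => kv.1)
  (order.foldl
    (fun (acc : PySem.Dict String (PySem.Dict String Int)) item =>
      acc.insert item (bases.getD item PySem.Dict.empty))
    PySem.Dict.empty).items.map (fun p => (p.1, p.2.items))

-- ===== PRECONDITION & SPEC =====
def Spec_get_conditional_pattern_base (frequent_itemsets : List (String × Int)) (sorted_sransactions : List (List (String × Int))) (out : List (String × List (String × Int))) : Prop := out = get_conditional_pattern_base_alt frequent_itemsets sorted_sransactions
instance (frequent_itemsets : List (String × Int)) (sorted_sransactions : List (List (String × Int))) (out : List (String × List (String × Int))) : Decidable (Spec_get_conditional_pattern_base frequent_itemsets sorted_sransactions out) := by unfold Spec_get_conditional_pattern_base; infer_instance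

-- ===== CLAIM (what is proved, stated in full; the proofs are below) =====
def Claim_equal_get_conditional_pattern_base : Prop := ∀ (frequent_itemsets : List (String × Int)) (sorted_sransactions : List (List (String × Int))), Dom_get_conditional_pattern_base frequent_itemsets sorted_sransactions → Spec_get_conditional_pattern_base frequent_itemsets sorted_sransactions (get_conditional_pattern_base frequent_itemsets sorted_sransactions)

-- ===== LEMMAS AND PROOFS =====

-- A's raw comma-append fold
def pvF (l : List String) : List Char := l.foldl (fun acc s => acc ++ s.toList ++ [',']) []

-- the comma-joined prefix path (what both programs denote by 'path')
def pvJ (l : List String) : List Char := if l.isEmpty then [] else (pvF l).dropLast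

theorem pvF_concat (l : List String) (s : String) :
    pvF (l ++ [s]) = pvF l ++ s.toList ++ [','] := by
  simp [pvF]

theorem pvF_eq_pvJ_comma (l : List String) (h : l ≠ []) : pvF l = pvJ l ++ [','] := by
  rcases List.eq_nil_or_concat l with rfl | ⟨l', s, rfl⟩
  · exact absurd rfl h
  · simp [pvJ, pvF_concat]

theorem pvJ_concat (l : List String) (k : String) :
    pvJ (l ++ [k]) = if l.isEmpty then k.toList else pvJ l ++ ',' :: k.toList := by
  by_cases h : l = []
  · subst h; simp [pvJ, pvF]
  · rw [if_neg (by simpa using h)]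
    have h2 : pvF (l ++ [k]) = (pvJ l ++ ',' :: k.toList) ++ [','] := by
      rw [pvF_concat, pvF_eq_pvJ_comma l h]; simp
    have h3 : (l ++ [k]).isEmpty = false := by simp
    rw [pvJ, if_neg (by simp [h3]), h2, List.dropLast_concat]

theorem pvPathA_eq (l : List String) : pvPathA l = String.mk (pvJ l) := by
  by_cases h : l = []
  · subst h; rfl
  · unfold pvPathA pvJ pvF
    rw [if_pos (List.length_pos_iff.mpr h), if_neg (by simpa using h)]

-- lookups through B's setdefault-then-overwrite update of the outer dict
theorem pvUpd_getD_self (b : PySem.Dict String (PySem.Dict String Int)) (k : String)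
    (v : PySem.Dict String Int) :
    ((b.setdefault k PySem.Dict.empty).insert k v).getD k PySem.Dict.empty = v := by
  simp

theorem pvUpd_getD_ne (b : PySem.Dict String (PySem.Dict String Int)) (k j : String)
    (v : PySem.Dict String Int) (hj : j ≠ k) :
    ((b.setdefault k PySem.Dict.empty).insert k v).getD j PySem.Dict.empty
      = b.getD j PySem.Dict.empty := by
  rw [PySem.Dict.getD_insert_of_ne _ _ _ hj]
  simp [PySem.Dict.getD, PySem.Dict.get?_setdefault_of_ne _ _ hj]

-- how B's inner walk over one transaction's keys acts on the projection of the outer dict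
theorem pvInner_proj (item : String) (ks : List String) :
    ∀ (b : PySem.Dict String (PySem.Dict String Int)) (pre : List String), ks.Nodup →
    ((ks.foldl pvStepBInner (b, pvJ pre, pre.isEmpty)).1).getD item PySem.Dict.empty =
      if item ∈ ks then
        (fun d => d.insert (String.mk (pvJ (pre ++ List.take ((ks.idxOf? item).getD 0) ks)))
          (d.getD (String.mk (pvJ (pre ++ List.take ((ks.idxOf? item).getD 0) ks))) 0 + 1))
          (b.getD item PySem.Dict.empty)
      else b.getD item PySem.Dict.empty := by
  induction ks with
  | nil => intro b pre _; simp
  | cons k tl ih =>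
    intro b pre hnd
    rw [List.foldl_cons]
    have hstep : pvStepBInner (b, pvJ pre, pre.isEmpty) k =
        ((b.setdefault k PySem.Dict.empty).insert k
          ((b.getD k PySem.Dict.empty).insert (String.mk (pvJ pre))
            ((b.getD k PySem.Dict.empty).getD (String.mk (pvJ pre)) 0 + 1)),
         pvJ (pre ++ [k]), (pre ++ [k]).isEmpty) := by
      simp [pvStepBInner, PySem.Dict.getD_setdefault_self, pvJ_concat]
    rw [hstep]
    set b1 := (b.setdefault k PySem.Dict.empty).insert k
      ((b.getD k PySem.Dict.empty).insert (String.mk (pvJ pre))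
        ((b.getD k PySem.Dict.empty).getD (String.mk (pvJ pre)) 0 + 1)) with hb1
    rw [ih b1 (pre ++ [k]) hnd.of_cons]
    by_cases hk : item = k
    · subst hk
      have hnotin : item ∉ tl := (List.nodup_cons.mp hnd).1
      rw [if_neg hnotin, if_pos (List.mem_cons_self)]
      have : (List.idxOf? item (item :: tl)).getD 0 = 0 := by
        simp [List.idxOf?_cons]
      rw [this]
      simp only [List.take_zero, List.append_nil, hb1]
      rw [pvUpd_getD_self]
    · have hbase : b1.getD item PySem.Dict.empty = b.getD item PySem.Dict.empty :=
        pvUpd_getD_ne b k item _ hk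
      by_cases hmem : item ∈ tl
      · rw [if_pos hmem, if_pos (List.mem_cons_of_mem k hmem)]
        obtain ⟨n, hn⟩ := Option.isSome_iff_exists.mp (List.isSome_idxOf?.mpr hmem)
        have hcons : (List.idxOf? item (k :: tl)).getD 0 = n + 1 := by
          have : (k == item) = false := by simp [Ne.symm hk]
          simp [List.idxOf?_cons, this, hn]
        rw [hcons, hn]
        simp only [Option.getD_some, List.take_succ_cons, hbase]
        have harr : pre ++ k :: List.take n tl = (pre ++ [k]) ++ List.take n tl := by simp
        rw [harr]
      · rw [if_neg hmem, if_neg (by simp [hk, hmem]), hbase]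

-- per-transaction agreement: B's single inner walk updates the projection exactly as A's step
theorem pvStep_proj (item : String) (b : PySem.Dict String (PySem.Dict String Int))
    (t : List (String × Int)) :
    (pvStepB b t).getD item PySem.Dict.empty =
      pvStepA item (b.getD item PySem.Dict.empty) t := by
  unfold pvStepB pvStepA
  have hinner := pvInner_proj item (PySem.Dict.ofList t).keys b []
    (PySem.Dict.nodup_keys_ofList t)
  rw [show ((b, ([] : List Char), true) : _) = (b, pvJ [], ([] : List String).isEmpty) from rfl]
  rw [hinner]
  have hcond : ((PySem.Dict.ofList t).get? item).isSome = true ↔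
      item ∈ (PySem.Dict.ofList t).keys := by
    rw [← PySem.Dict.contains_eq_isSome_get?, PySem.Dict.contains_iff_mem_keys]
  by_cases hmem : item ∈ (PySem.Dict.ofList t).keys
  · rw [if_pos hmem, if_pos (hcond.mpr hmem)]
    set ks := (PySem.Dict.ofList t).keys
    set n : Nat := (ks.idxOf? item).getD 0 with hn
    have hslice : PySem.List.slice ks none (some (n : Int)) = List.take n ks := by
      rw [PySem.List.slice_to ks (by positivity)]
      simp
    have hidx : (PySem.List.index? ks item).getD 0 = n := rfl
    show _ = PySem.Dict.modify (b.getD item PySem.Dict.empty)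
      (pvPathA (PySem.List.slice ks none (some (((PySem.List.index? ks item).getD 0 : Nat) : Int))))
      0 (· + 1)
    rw [hidx, hslice, pvPathA_eq]
    simp [PySem.Dict.modify]
  · rw [if_neg hmem, if_neg (by simp [Option.isSome_iff_exists] at hcond ⊢; tauto)]

-- over all transactions
theorem pvFold_proj (item : String) (ts : List (List (String × Int)))
    (b : PySem.Dict String (PySem.Dict String Int)) :
    (ts.foldl pvStepB b).getD item PySem.Dict.empty =
      ts.foldl (pvStepA item) (b.getD item PySem.Dict.empty) := by
  induction ts generalizing b with
  | nil => rfl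
  | cons t ts ih => rw [List.foldl_cons, List.foldl_cons, ih, pvStep_proj]

-- the keys of dict(l) are exactly l's first components when those are distinct
theorem pvKeys_ofList {ν : Type} (l : List (String × ν)) (h : (l.map Prod.fst).Nodup) :
    (PySem.Dict.ofList l).keys = l.map Prod.fst := by
  have hfresh : ∀ a ∈ l, (PySem.Dict.empty : PySem.Dict String ν).contains a.1 = false :=
    fun _ _ => rfl
  have hitems := PySem.Dict.items_foldl_insert_fresh l Prod.fst Prod.snd PySem.Dict.empty hfresh h
  have : (PySem.Dict.ofList l).items = l := by
    rw [show PySem.Dict.ofList l =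
      l.foldl (fun d a => d.insert a.1 a.2) PySem.Dict.empty from rfl, hitems]
    simp [PySem.Dict.empty]
  simp [PySem.Dict.keys, this]

-- items of a fold that inserts fresh distinct keys, as a map
theorem pvItems_build (l : List String) (f : String → PySem.Dict String Int) (h : l.Nodup) :
    ((l.foldl (fun (acc : PySem.Dict String (PySem.Dict String Int)) item =>
        acc.insert item (f item)) PySem.Dict.empty)).items
      = l.map (fun item => (item, f item)) := by
  have hfresh : ∀ a ∈ l,
      (PySem.Dict.empty : PySem.Dict String (PySem.Dict String Int)).contains a = false :=
    fun _ _ => rfl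
  have := PySem.Dict.items_foldl_insert_fresh l (fun a => a) f PySem.Dict.empty hfresh
    (by simpa using h)
  simpa using this

-- ===== VERDICT (by name: the statement is the Claim_ definition above) =====
theorem get_conditional_pattern_base_spec : Claim_equal_get_conditional_pattern_base := by
  intro fis ts _
  unfold Spec_get_conditional_pattern_base
  unfold get_conditional_pattern_base get_conditional_pattern_base_alt
  simp only []
  set fi := PySem.Dict.ofList fis with hfi
  set sortedItems := PySem.List.sorted fi.items (fun p => p.2) with hsi
  have hnodup : (sortedItems.map Prod.fst).Nodup := by
    have hperm : (sortedItems.map Prod.fst).Perm (fi.items.map Prod.fst) :=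
      (PySem.List.sorted_perm fi.items (fun p => p.2) false).map Prod.fst
    exact hperm.symm.nodup (PySem.Dict.nodup_keys_ofList fis)
  have hkeys : (PySem.Dict.ofList sortedItems).keys = sortedItems.map Prod.fst :=
    pvKeys_ofList sortedItems hnodup
  rw [hkeys]
  rw [pvItems_build _ _ hnodup, pvItems_build _ _ hnodup]
  rw [List.map_map, List.map_map, List.map_map, List.map_map]
  refine List.map_congr_left (fun it _ => ?_)
  simp only [Function.comp]
  rw [pvFold_proj it.1 ts PySem.Dict.empty]
  rfl
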